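-- pv_equiv track=rewrite | github.com/ShuvalovAnthony/ege | 15/13745.py | check
-- ===== SOURCE A (Python) =====
-- def check(a):
--     for x in range(1000):
--         for y in range(1000):
--             if not (
--                 ((x <= 9) <= (x**2 <= a)) and
--                 ((y**2 <= a) <= (y <= 9))
--             ): return False
--
--     return True
-- ===== SOURCE B (Python) =====
-- def check(a):
--     # Closed form: the universal condition holds iff 81 <= a < 100.
--     return 81 <= a < 100
-- ===== Notes on version B (the rewrite author's own statement) =====
-- stated objective: faster
-- what changed: Replaced the 1000x1000 nested scan with the closed-form condition 81 <= a < 100 (the binding cases are x=9 and y=10).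
import Mathlib
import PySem

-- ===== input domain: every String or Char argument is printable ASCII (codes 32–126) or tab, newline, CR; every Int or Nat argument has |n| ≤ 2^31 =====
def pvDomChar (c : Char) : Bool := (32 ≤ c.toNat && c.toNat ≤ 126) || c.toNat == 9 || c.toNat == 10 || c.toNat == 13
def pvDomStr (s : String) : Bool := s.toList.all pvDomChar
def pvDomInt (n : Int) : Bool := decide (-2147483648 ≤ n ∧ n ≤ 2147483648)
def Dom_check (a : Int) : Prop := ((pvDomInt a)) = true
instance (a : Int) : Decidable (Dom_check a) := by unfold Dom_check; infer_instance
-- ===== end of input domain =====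

-- B replaces the 1000×1000 nested scan with the closed form 81 ≤ a < 100 (objective: faster).

-- ===== PORT A =====
-- nested for-loops with early 'return False' = .all over both ranges;
-- Python's 'p <= q' on bools is implication, ported as '!p || q'
def check (a : Int) : Bool :=
  (PySem.List.pyRange 0 1000 1).all (fun x =>
    (PySem.List.pyRange 0 1000 1).all (fun y =>
      (!(decide (x ≤ 9)) || decide (x ^ 2 ≤ a)) &&
      (!(decide (y ^ 2 ≤ a)) || decide (y ≤ 9))))

-- ===== PORT B =====
def check_alt (a : Int) : Bool := decide (81 ≤ a ∧ a < 100)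

-- ===== PRECONDITION & SPEC =====
def Spec_check (a : Int) (out : Bool) : Prop := out = check_alt a
instance (a : Int) (out : Bool) : Decidable (Spec_check a out) := by unfold Spec_check; infer_instance

-- ===== CLAIM (what is proved, stated in full; the proofs are below) =====
def Claim_equal_check : Prop := ∀ (a : Int), Dom_check a → Spec_check a (check a)

-- ===== LEMMAS AND PROOFS =====
theorem check_iff (a : Int) : check a = true ↔ (81 ≤ a ∧ a < 100) := by
  unfold check
  simp only [List.all_eq_true, PySem.List.mem_pyRange_one, Bool.and_eq_true,
    Bool.or_eq_true, Bool.not_eq_true', decide_eq_true_iff, decide_eq_false_iff_not]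
  constructor
  · intro h
    have h1 := h 9 ⟨by norm_num, by norm_num⟩
    have h2 := h1 10 ⟨by norm_num, by norm_num⟩
    obtain ⟨hx, hy⟩ := h2
    norm_num at hx hy
    exact ⟨hx, by omega⟩
  · rintro ⟨h81, h100⟩ x ⟨hx0, _⟩ y ⟨hy0, _⟩
    constructor
    · by_cases hx9 : x ≤ 9
      · right; nlinarith
      · left; simpa using hx9
    · by_cases hy2 : y ^ 2 ≤ a
      · right; nlinarith
      · left; simpa using hy2

-- ===== VERDICT (by name: the statement is the Claim_ definition above) =====
theorem check_spec : Claim_equal_check := by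
  intro a _
  unfold Spec_check check_alt
  by_cases h : 81 ≤ a ∧ a < 100
  · simp [h, (check_iff a).mpr h]
  · have hf : check a = false := by
      cases hb : check a
      · rfl
      · exact absurd ((check_iff a).mp hb) h
    simp [h, hf]
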